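-- pv_equiv track=rewrite | github.com/dkoslicki/TAMPA | src/ProfilesLayout.py | abbreaviate_name
-- ===== SOURCE A (Python) =====
-- def abbreaviate_name(name):
--
--     names = name.split(' ')
--     abbr_name = names[0][0]+'.'
--     if len(names) > 1:
--         for i in range(1,len(names)):
--             abbr_name += ' '+names[i]
--     else:
--         return name
--     return abbr_name
-- ===== SOURCE B (Python) =====
-- def abbreaviate_name(name):
--     first, sep, rest = name.partition(' ')
--     abbr = first[0] + '.'
--     if sep:
--         return abbr + ' ' + rest
--     return name
-- ===== Notes on version B (the rewrite author's own statement) =====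
-- stated objective: simpler
-- what changed: B splits only at the first space with str.partition and keeps the remainder as one intact string, instead of building the full token list and re-joining it word by word in a loop.
import Mathlib
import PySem

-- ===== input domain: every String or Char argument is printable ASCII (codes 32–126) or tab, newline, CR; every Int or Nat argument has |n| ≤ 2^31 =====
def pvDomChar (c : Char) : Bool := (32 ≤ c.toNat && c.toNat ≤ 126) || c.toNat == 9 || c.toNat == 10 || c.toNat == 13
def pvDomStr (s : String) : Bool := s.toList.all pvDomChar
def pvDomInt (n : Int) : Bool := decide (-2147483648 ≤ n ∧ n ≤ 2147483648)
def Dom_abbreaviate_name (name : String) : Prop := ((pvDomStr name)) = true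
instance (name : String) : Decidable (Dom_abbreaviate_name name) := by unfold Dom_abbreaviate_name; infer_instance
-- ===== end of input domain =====

-- B splits only at the first space (str.partition) and keeps the remainder intact,
-- instead of building the full token list and re-joining it word by word (objective: simpler).

-- ===== PORT A =====
-- names = name.split(' '); abbr = names[0][0]+'.'; loop appends ' '+names[i]
def abbreaviate_name (name : String) : String :=
  let names := PySem.Chars.splitOn name.toList [' ']
  match PySem.List.pyGet? names 0 with
  | none => ""      -- IndexError (unreachable)
  | some w0 =>
    match PySem.List.pyGet? w0 0 with
    | none => ""    -- IndexError: names[0] empty; excluded by Pre_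
    | some c =>
      let abbr := [c, '.']
      if 1 < names.length then
        String.ofList ((PySem.List.pyRange 1 (names.length : Int) 1).foldl
          (fun acc i => acc ++ (' ' :: PySem.List.pyGetD names i [])) abbr)
      else name

-- ===== PORT B =====
-- name.partition(' '): chars before the first space, whether a space was found, chars after it
def pvPartSp : List Char → List Char × Bool × List Char
  | [] => ([], false, [])
  | c :: cs =>
      if c = ' ' then ([], true, cs)
      else
        let (f, s, r) := pvPartSp cs
        (c :: f, s, r)

def abbreaviate_name_alt (name : String) : String :=
  let (first, sep, rest) := pvPartSp name.toList
  match PySem.List.pyGet? first 0 with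
  | none => ""    -- IndexError: first empty; excluded by Pre_
  | some c =>
    let abbr := [c, '.']
    if sep then String.ofList (abbr ++ ' ' :: rest) else name

-- ===== PRECONDITION & SPEC =====
-- Pre_ excludes exactly the inputs where A raises IndexError: the empty string and
-- strings starting with a space (names[0] is empty there).
def Pre_abbreaviate_name (name : String) : Prop :=
  name.toList ≠ [] ∧ name.toList.head? ≠ some ' '
instance (name : String) : Decidable (Pre_abbreaviate_name name) := by unfold Pre_abbreaviate_name; infer_instance

def pvWitness_abbreaviate_name : String := "John Smith"

def Spec_abbreaviate_name (name : String) (out : String) : Prop := out = abbreaviate_name_alt name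
instance (name : String) (out : String) : Decidable (Spec_abbreaviate_name name out) := by unfold Spec_abbreaviate_name; infer_instance

-- ===== CLAIM (what is proved, stated in full; the proofs are below) =====
def Claim_equal_abbreaviate_name : Prop := ∀ (name : String), Dom_abbreaviate_name name → Pre_abbreaviate_name name → Spec_abbreaviate_name name (abbreaviate_name name)

-- ===== LEMMAS AND PROOFS =====

-- reference splitter: name.split(' ') as a plain structural recursion
def splitSp : List Char → List (List Char)
  | [] => [[]]
  | c :: cs =>
      if c = ' ' then [] :: splitSp cs
      else
        match splitSp cs with
        | [] => [[c]]
        | w :: ws => (c :: w) :: ws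

lemma splitSp_ne_nil (cs : List Char) : splitSp cs ≠ [] := by
  cases cs with
  | nil => simp [splitSp]
  | cons c rest =>
    simp only [splitSp]
    split_ifs
    · simp
    · cases h : splitSp rest <;> simp

lemma splitOn_go_spec (fuel : Nat) (l cur : List Char) (accl : List (List Char))
    (h : l.length < fuel) :
    PySem.Chars.splitOn.go [' '] fuel l cur accl =
      accl.reverse ++
        (match splitSp l with
         | [] => []
         | w :: ws => (cur.reverse ++ w) :: ws) := by
  induction fuel generalizing l cur accl with
  | zero => omega
  | succ n ih =>
    cases l with
    | nil => simp [PySem.Chars.splitOn.go, splitSp]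
    | cons c rest =>
      simp only [PySem.Chars.splitOn.go]
      by_cases hc : c = ' '
      · subst hc
        have hp : ([' '] : List Char).isPrefixOf (' ' :: rest) = true := by
          simp [List.isPrefixOf]
        rw [if_pos hp]
        have hdrop : List.drop ([' '] : List Char).length (' ' :: rest) = rest := rfl
        rw [hdrop, ih rest [] (cur.reverse :: accl) (by simpa using Nat.lt_of_succ_lt_succ h)]
        simp only [splitSp]
        cases hs : splitSp rest with
        | nil => exact absurd hs (splitSp_ne_nil rest)
        | cons w ws => simp
      · have hp : ([' '] : List Char).isPrefixOf (c :: rest) = false := by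
          simp [List.isPrefixOf]
          exact fun hh => hc hh.symm
        rw [if_neg (by simp [hp])]
        rw [ih rest (c :: cur) accl (by simpa using Nat.lt_of_succ_lt_succ h)]
        simp only [splitSp, if_neg hc]
        cases hs : splitSp rest with
        | nil => exact absurd hs (splitSp_ne_nil rest)
        | cons w ws => simp

lemma splitOn_eq_splitSp (cs : List Char) :
    PySem.Chars.splitOn cs [' '] = splitSp cs := by
  unfold PySem.Chars.splitOn
  rw [splitOn_go_spec (cs.length + 1) cs [] [] (by omega)]
  cases hs : splitSp cs with
  | nil => exact absurd hs (splitSp_ne_nil cs)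
  | cons w ws => simp

-- partition vs split: the split of cs is the chunk before the first space
-- followed by the split of the remainder
lemma splitSp_partSp (cs : List Char) :
    splitSp cs =
      (let (f, s, r) := pvPartSp cs
       if s then f :: splitSp r else [f]) := by
  induction cs with
  | nil => simp [splitSp, pvPartSp]
  | cons c rest ih =>
    rcases hp : pvPartSp rest with ⟨f, s, r⟩
    rw [hp] at ih
    by_cases hc : c = ' '
    · simp [splitSp, pvPartSp, hc]
    · cases s with
      | false =>
        simp only [Bool.false_eq_true, if_false] at ih
        simp [splitSp, pvPartSp, hc, hp, ih]
      | true =>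
        simp only [if_true] at ih
        simp [splitSp, pvPartSp, hc, hp, ih]

-- joining the split of r with ' ' in front of each word gives back ' ' :: r
lemma flatMap_splitSp (r : List Char) :
    (splitSp r).flatMap (fun w => ' ' :: w) = ' ' :: r := by
  induction r with
  | nil => simp [splitSp]
  | cons c rest ih =>
    simp only [splitSp]
    by_cases hc : c = ' '
    · subst hc
      simp [ih]
    · simp only [if_neg hc]
      cases hs : splitSp rest with
      | nil => exact absurd hs (splitSp_ne_nil rest)
      | cons w ws =>
        rw [hs] at ih
        simp only [List.flatMap_cons] at ih ⊢
        have : w ++ ws.flatMap (fun w => ' ' :: w) = rest := by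
          simpa using ih
        simp [this]

-- the indexed loop over names[1:] is the flatMap over the dropped list
lemma range_flatMap_drop (ws : List (List Char)) (j : Nat) :
    (PySem.List.pyRange (j : Int) (ws.length : Int) 1).flatMap
        (fun i => ' ' :: PySem.List.pyGetD ws i []) =
      (ws.drop j).flatMap (fun w => ' ' :: w) := by
  by_cases hj : j < ws.length
  · have : (PySem.List.pyRange (j : Int) (ws.length : Int) 1) =
        (j : Int) :: PySem.List.pyRange ((j : Int) + 1) (ws.length : Int) 1 :=
      PySem.List.pyRange_one_cons (by exact_mod_cast hj)
    rw [this]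
    have h2 : ((j : Int) + 1) = ((j + 1 : Nat) : Int) := by push_cast; ring
    rw [List.flatMap_cons, h2, range_flatMap_drop ws (j + 1)]
    have hget : PySem.List.pyGetD ws (j : Int) [] = ws[j] := by
      rw [PySem.List.pyGetD_natCast]
      simp [List.getD, hj]
    rw [hget, List.drop_eq_getElem_cons hj, List.flatMap_cons]
  · have h1 : ws.drop j = [] := List.drop_eq_nil_of_le (by omega)
    have h2 : PySem.List.pyRange (j : Int) (ws.length : Int) 1 = [] := by
      simp [PySem.List.pyRange]
      omega
    simp [h1, h2]
termination_by ws.length - j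

-- ===== VERDICT (by name: the statement is the Claim_ definition above) =====
theorem abbreaviate_name_spec : Claim_equal_abbreaviate_name := by
  intro name _ hpre
  unfold Spec_abbreaviate_name abbreaviate_name abbreaviate_name_alt
  unfold Pre_abbreaviate_name at hpre
  cases hcs : name.toList with
  | nil => rw [hcs] at hpre; exact absurd rfl hpre.1
  | cons c rest =>
    rw [hcs] at hpre
    have hc : c ≠ ' ' := by simpa using hpre.2
    rcases hp : pvPartSp rest with ⟨f, s, r⟩
    have hpart : pvPartSp (c :: rest) = (c :: f, s, r) := by
      simp [pvPartSp, hc, hp]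
    rw [hpart, splitOn_eq_splitSp]
    cases s with
    | false =>
      have hsplit : splitSp (c :: rest) = [c :: f] := by
        rw [splitSp_partSp (c :: rest), hpart]; simp
      rw [hsplit]
      simp [PySem.List.pyGet?, PySem.List.pyIdx?]
    | true =>
      have hsplit : splitSp (c :: rest) = (c :: f) :: splitSp r := by
        rw [splitSp_partSp (c :: rest), hpart]; simp
      rw [hsplit]
      have h1 : PySem.List.pyGet? ((c :: f) :: splitSp r) 0 = some (c :: f) := by
        simp [PySem.List.pyGet?, PySem.List.pyIdx?]
      have h2 : PySem.List.pyGet? (c :: f) 0 = some c := by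
        simp [PySem.List.pyGet?, PySem.List.pyIdx?]
      simp only [h1, h2]
      have hlen : 1 < ((c :: f) :: splitSp r).length := by
        cases hs : splitSp r with
        | nil => exact absurd hs (splitSp_ne_nil r)
        | cons w ws => simp
      rw [if_pos hlen, PySem.List.foldl_append_eq_flatMap]
      have h3 := range_flatMap_drop ((c :: f) :: splitSp r) 1
      push_cast at h3
      rw [h3]
      have h4 : List.drop 1 ((c :: f) :: splitSp r) = splitSp r := rfl
      rw [h4, flatMap_splitSp]
      simp
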